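-- pv_equiv track=rewrite | github.com/opencivicdata/python-legistar-scraper | legistar/bills.py | _filter_relations
-- ===== SOURCE A (Python) =====
-- def _filter_relations(relations):
--     '''
--     Sometimes, many versions of a bill are related. This method returns the
--     most recent version of each relation. Override this method to apply a
--     different filter or return the full array of relations.
--     '''
--     # Sort relations such that the latest version of each matter
--     # ID is returned first.
--     sorted_relations = sorted(
--         relations,
--         key=lambda x: (
--             x['MatterRelationMatterId'],
--             x['MatterRelationFlag']
--         ),
--         reverse=True
--     )
--
--     seen_relations = set()
--
--     for relation in sorted_relations:
--         relation_id = relation['MatterRelationMatterId']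
--
--         if relation_id not in seen_relations:
--             yield relation
--             seen_relations.add(relation_id)
-- ===== SOURCE B (Python) =====
-- def _filter_relations(relations):
--     # One pass keeping, per matter id, the earliest relation with the strictly
--     # greatest flag (strict > reproduces the stable descending sort's choice);
--     # then yield per id in descending id order.  Generator, like the original.
--     best = {}
--     for relation in relations:
--         relation_id = relation['MatterRelationMatterId']
--         current = best.get(relation_id)
--         if current is None or relation['MatterRelationFlag'] > current['MatterRelationFlag']:
--             best[relation_id] = relation
--     for relation_id in sorted(best, reverse=True):
--         yield best[relation_id]
-- ===== Notes on version B (the rewrite author's own statement) =====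
-- stated objective: alternative
-- what changed: A stably sorts all relations by (id, flag) descending and dedups with a seen-set; B makes one dict pass keeping per matter id the earliest relation with the strictly greatest flag, then yields the stored relations for the distinct ids in descending order.
import Mathlib
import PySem

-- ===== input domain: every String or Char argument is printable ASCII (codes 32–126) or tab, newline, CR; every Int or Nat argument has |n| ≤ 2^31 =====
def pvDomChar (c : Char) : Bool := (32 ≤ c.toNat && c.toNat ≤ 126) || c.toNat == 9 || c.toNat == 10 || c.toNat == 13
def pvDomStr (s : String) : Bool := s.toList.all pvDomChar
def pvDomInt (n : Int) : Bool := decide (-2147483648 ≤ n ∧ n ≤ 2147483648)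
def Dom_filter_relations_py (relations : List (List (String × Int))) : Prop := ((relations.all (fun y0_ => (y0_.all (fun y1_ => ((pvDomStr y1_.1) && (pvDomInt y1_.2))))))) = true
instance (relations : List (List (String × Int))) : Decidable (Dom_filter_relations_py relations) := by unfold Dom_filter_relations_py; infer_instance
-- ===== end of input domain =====

-- B replaces A's global stable sort + seen-set dedup by a single dict pass keeping, per matter
-- id, the earliest relation with the strictly greatest flag, then yields ids in descending order
-- (objective: alternative — one O(n) pass plus a sort of the distinct ids instead of a full sort).

def pvIdK : String := "MatterRelationMatterId"
def pvFlagK : String := "MatterRelationFlag"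

-- r[k] for the Python dict r; a missing key is a KeyError, excluded by Pre_ below
-- (the 0 default is never reached inside Pre_).
def pvGetI (r : List (String × Int)) (k : String) : Int := ((PySem.Dict.mk r).get? k).getD 0

-- ===== PORT A =====
def filter_relations_py (relations : List (List (String × Int))) : List (List (String × Int)) :=
  let sorted_relations :=
    PySem.List.sorted2 relations (fun x => pvGetI x pvIdK) (fun x => pvGetI x pvFlagK) true
  (sorted_relations.foldl
    (fun (st : List (List (String × Int)) × PySem.Set Int) relation =>
      let relation_id := pvGetI relation pvIdK
      if PySem.Set.contains st.2 relation_id then st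
      else (st.1 ++ [relation], PySem.Set.add st.2 relation_id))
    ([], PySem.Set.empty)).1

-- ===== PORT B =====
def filter_relations_py_alt (relations : List (List (String × Int))) : List (List (String × Int)) :=
  let best := relations.foldl
    (fun (best : PySem.Dict Int (List (String × Int))) relation =>
      let rid := pvGetI relation pvIdK
      match best.get? rid with
      | none => best.insert rid relation
      | some current =>
        if pvGetI relation pvFlagK > pvGetI current pvFlagK then best.insert rid relation
        else best)
    PySem.Dict.empty
  (PySem.List.sorted best.keys (fun k => k) true).map (fun rid => best.getD rid [])

-- ===== PRECONDITION & SPEC =====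
-- Pre_ excludes exactly the inputs where some relation lacks one of the two keys:
-- there Python A raises KeyError (no value is returned).
def Pre_filter_relations_py (relations : List (List (String × Int))) : Prop :=
  ∀ r ∈ relations, (PySem.Dict.mk r).contains pvIdK = true ∧ (PySem.Dict.mk r).contains pvFlagK = true
instance (relations : List (List (String × Int))) : Decidable (Pre_filter_relations_py relations) := by
  unfold Pre_filter_relations_py; infer_instance

def pvWitness_filter_relations_py : (List (List (String × Int))) :=
  [[("MatterRelationMatterId", 7), ("MatterRelationFlag", 1)],
   [("MatterRelationMatterId", 7), ("MatterRelationFlag", 2)],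
   [("MatterRelationMatterId", 3), ("MatterRelationFlag", 0)]]

def Spec_filter_relations_py (relations : List (List (String × Int))) (out : List (List (String × Int))) : Prop := out = filter_relations_py_alt relations
instance (relations : List (List (String × Int))) (out : List (List (String × Int))) : Decidable (Spec_filter_relations_py relations out) := by unfold Spec_filter_relations_py; infer_instance

-- ===== CLAIM (what is proved, stated in full; the proofs are below) =====
def Claim_equal_filter_relations_py : Prop := ∀ (relations : List (List (String × Int))), Dom_filter_relations_py relations → Pre_filter_relations_py relations → Spec_filter_relations_py relations (filter_relations_py relations)

-- ===== LEMMAS AND PROOFS =====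

abbrev PRel : Type := List (String × Int)

def rid (r : PRel) : Int := pvGetI r pvIdK
def rflag (r : PRel) : Int := pvGetI r pvFlagK

-- the insertion comparator of sorted2 … true (insert x before y)
def bef (x y : PRel) : Bool :=
  decide (rid y < rid x) || (!decide (rid x < rid y) && decide (rflag y < rflag x))

def keyLe (a b : PRel) : Prop := rid a < rid b ∨ (rid a = rid b ∧ rflag a ≤ rflag b)

-- dedup-by-id keeping first occurrences (A's seen-set loop, filter formulation)
def dd : List PRel → List PRel
  | [] => []
  | r :: ys => r :: dd (ys.filter (fun s => decide (rid s ≠ rid r)))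
termination_by l => l.length
decreasing_by
  calc (List.filter (fun s => decide (rid s.val ≠ rid r)) ys.attach).unattach.length
      = (List.filter (fun s => decide (rid s.val ≠ rid r)) ys.attach).length := List.length_unattach
    _ ≤ ys.attach.length := List.length_filter_le _ _
    _ < ys.length + 1 := by simp

-- insert x into an id-descending best-list (B's dict update, viewed on the sorted side)
def dIns (x : PRel) : List PRel → List PRel
  | [] => [x]
  | d :: ds =>
    if rid d < rid x then x :: d :: ds
    else if rid x = rid d then (if rflag d < rflag x then x :: ds else d :: ds)
    else d :: dIns x ds

def gs (xs : List PRel) : List PRel := xs.foldl (fun ds x => dIns x ds) []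

def pr (r : PRel) : Int × PRel := (rid r, r)

lemma bef_true_iff (x y : PRel) :
    bef x y = true ↔ (rid y < rid x ∨ (rid y = rid x ∧ rflag y < rflag x)) := by
  simp [bef]; omega

lemma bef_false_iff (x y : PRel) : bef x y = false ↔ keyLe x y := by
  simp [keyLe, bef]; omega

lemma insertBy_nil (x : PRel) : PySem.List.insertBy bef x [] = [x] := rfl

lemma insertBy_cons (x y : PRel) (ys : List PRel) :
    PySem.List.insertBy bef x (y :: ys) =
      if bef x y then x :: y :: ys else y :: PySem.List.insertBy bef x ys := rfl

lemma insertBy_all_bef (x : PRel) (l : List PRel) (h : ∀ s ∈ l, bef x s = true) :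
    PySem.List.insertBy bef x l = x :: l := by
  cases l with
  | nil => rfl
  | cons y ys => rw [insertBy_cons, if_pos (h y (by simp))]

lemma sorted2_eq (xs : List PRel) :
    PySem.List.sorted2 xs (fun x => pvGetI x pvIdK) (fun x => pvGetI x pvFlagK) true =
      xs.foldl (fun acc x => PySem.List.insertBy bef x acc) [] := rfl

lemma dd_nil : dd [] = [] := by simp [dd]

lemma dd_cons (r : PRel) (ys : List PRel) :
    dd (r :: ys) = r :: dd (ys.filter (fun s => decide (rid s ≠ rid r))) := by
  simp [dd]

lemma pw_insertBy (x : PRel) (l : List PRel) (h : l.Pairwise (fun a b => keyLe b a)) :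
    (PySem.List.insertBy bef x l).Pairwise (fun a b => keyLe b a) := by
  induction l with
  | nil => simp [insertBy_nil]
  | cons y t ih =>
    rcases List.pairwise_cons.mp h with ⟨hy, ht⟩
    rw [insertBy_cons]
    by_cases hb : bef x y = true
    · rw [if_pos hb]
      have hxy := (bef_true_iff x y).mp hb
      refine List.pairwise_cons.mpr ⟨?_, h⟩
      intro s hs
      rcases List.mem_cons.mp hs with rfl | hs
      · unfold keyLe; omega
      · have := hy s hs; unfold keyLe at this ⊢; omega
    · have hxy := (bef_false_iff x y).mp (Bool.not_eq_true _ ▸ hb)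
      rw [if_neg hb]
      refine List.pairwise_cons.mpr ⟨?_, ih ht⟩
      intro s hs
      rcases (PySem.List.mem_insertBy bef x s t).mp hs with rfl | hs
      · exact hxy
      · exact hy s hs

lemma filter_insertBy (x : PRel) (l : List PRel) (p : PRel → Bool)
    (h : l.Pairwise (fun a b => keyLe b a)) :
    (PySem.List.insertBy bef x l).filter p =
      if p x then PySem.List.insertBy bef x (l.filter p) else l.filter p := by
  induction l with
  | nil => cases hpx : p x <;> simp [insertBy_nil, hpx]
  | cons y t ih =>
    rcases List.pairwise_cons.mp h with ⟨hy, ht⟩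
    rw [insertBy_cons]
    by_cases hb : bef x y = true
    · rw [if_pos hb]
      have hxy := (bef_true_iff x y).mp hb
      have hall : ∀ s ∈ (y :: t).filter p, bef x s = true := by
        intro s hs
        rcases List.mem_cons.mp (List.mem_filter.mp hs).1 with rfl | hs'
        · exact hb
        · have := hy s hs'; rw [bef_true_iff]; unfold keyLe at this; omega
      cases hpx : p x
      · simp [List.filter_cons, hpx]
      · rw [if_pos rfl, insertBy_all_bef x _ hall]
        simp [List.filter_cons, hpx]
    · rw [if_neg hb]
      cases hpx : p x <;> cases hpy : p y <;>
        simp [hpx, hpy, ih ht, insertBy_cons, hb]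

lemma dd_insertBy (x : PRel) : ∀ (n : Nat) (l : List PRel), l.length ≤ n →
    l.Pairwise (fun a b => keyLe b a) →
    dd (PySem.List.insertBy bef x l) = dIns x (dd l) := by
  intro n
  induction n with
  | zero =>
    intro l hl _
    have : l = [] := List.eq_nil_of_length_eq_zero (Nat.le_zero.mp hl)
    subst this; simp [insertBy_nil, dd_nil, dd_cons, dIns]
  | succ n ih =>
    intro l hl hp
    cases l with
    | nil => simp [insertBy_nil, dd_nil, dd_cons, dIns]
    | cons y t =>
      rcases List.pairwise_cons.mp hp with ⟨hy, ht⟩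
      rw [insertBy_cons]
      by_cases hb : bef x y = true
      · rw [if_pos hb]
        have hxy := (bef_true_iff x y).mp hb
        rw [dd_cons]
        rcases hxy with hlt | ⟨heq, hflt⟩
        · have hfid : (y :: t).filter (fun s => decide (rid s ≠ rid x)) = y :: t := by
            apply List.filter_eq_self.mpr
            intro s hs
            rcases List.mem_cons.mp hs with rfl | hs'
            · simp; omega
            · have := hy s hs'; unfold keyLe at this; simp; omega
          rw [hfid, dd_cons]
          simp only [dIns]
          rw [if_pos hlt]
        · have hdrop : (fun s => decide (rid s ≠ rid x)) y = false := by simp; omega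
          rw [List.filter_cons_of_neg (by simp [hdrop]), dd_cons, dIns]
          rw [if_neg (by omega), if_pos (by omega), if_pos (by omega)]
          have : (fun s => decide (rid s ≠ rid x)) = (fun s => decide (rid s ≠ rid y)) := by
            funext s; rw [heq]
          rw [this]
      · have hxy := (bef_false_iff x y).mp (Bool.not_eq_true _ ▸ hb)
        rw [if_neg hb, dd_cons, filter_insertBy x t _ ht]
        by_cases hid : rid x = rid y
        · rw [if_neg (by simp [hid])]
          have hnf : ¬ rflag y < rflag x := by unfold keyLe at hxy; omega
          rw [dd_cons, dIns, if_neg (by omega), if_pos hid, if_neg hnf]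
        · have hlt : rid x < rid y := by unfold keyLe at hxy; omega
          rw [if_pos (by simp [hid])]
          have hlen : (t.filter (fun s => decide (rid s ≠ rid y))).length ≤ n := by
            have h1 := List.length_filter_le (fun s => decide (rid s ≠ rid y)) t
            simp at hl; omega
          rw [ih _ hlen (List.Pairwise.filter _ ht), dd_cons, dIns,
            if_neg (by omega), if_neg hid]

lemma pw_sorted_fold (xs : List PRel) :
    (xs.foldl (fun acc x => PySem.List.insertBy bef x acc) []).Pairwise (fun a b => keyLe b a) := by
  suffices h : ∀ (acc : List PRel), acc.Pairwise (fun a b => keyLe b a) →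
      (xs.foldl (fun acc x => PySem.List.insertBy bef x acc) acc).Pairwise (fun a b => keyLe b a) from
    h [] (by simp)
  induction xs with
  | nil => intro acc hacc; simpa using hacc
  | cons y t ih =>
    intro acc hacc
    exact ih _ (pw_insertBy y acc hacc)

lemma dd_sorted_eq_gs (xs : List PRel) :
    dd (xs.foldl (fun acc x => PySem.List.insertBy bef x acc) []) = gs xs := by
  induction xs using List.reverseRecOn with
  | nil => simp [dd_nil, gs]
  | append_singleton xs x ih =>
    rw [List.foldl_append, List.foldl_cons, List.foldl_nil,
      dd_insertBy x _ _ (le_refl _) (pw_sorted_fold xs), ih]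
    unfold gs
    rw [List.foldl_append, List.foldl_cons, List.foldl_nil]

lemma a_fold (l : List PRel) : ∀ (acc : List PRel) (seen : PySem.Set Int),
    (l.foldl
      (fun (st : List PRel × PySem.Set Int) relation =>
        if PySem.Set.contains st.2 (pvGetI relation pvIdK) then st
        else (st.1 ++ [relation], PySem.Set.add st.2 (pvGetI relation pvIdK)))
      (acc, seen)).1 =
      acc ++ dd (l.filter (fun r => !(PySem.Set.contains seen (rid r)))) := by
  intro acc seen
  induction l generalizing acc seen with
  | nil => simp [dd_nil]
  | cons r l ih =>
    rw [List.foldl_cons]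
    by_cases hc : PySem.Set.contains seen (pvGetI r pvIdK) = true
    · rw [if_pos hc]
      have hm : pvGetI r pvIdK ∈ seen := by simpa [PySem.Set.contains] using hc
      rw [ih, List.filter_cons_of_neg (p := fun r => !(PySem.Set.contains seen (rid r)))
        (by simp [rid, PySem.Set.contains, hm])]
    · rw [if_neg hc]
      have hm : pvGetI r pvIdK ∉ seen := by simpa [PySem.Set.contains] using hc
      rw [ih]
      dsimp only
      rw [List.filter_cons_of_pos (p := fun r => !(PySem.Set.contains seen (rid r)))
        (by simpa [rid, PySem.Set.contains] using hm), dd_cons, List.filter_filter]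
      have hpt : (fun a => !PySem.Set.contains (PySem.Set.add seen (pvGetI r pvIdK)) (rid a)) =
          (fun a => decide (rid a ≠ rid r) && !PySem.Set.contains seen (rid a)) := by
        funext a
        simp only [PySem.Set.add, PySem.Set.contains, rid]
        by_cases hmem : List.contains seen (pvGetI a pvIdK) = true <;>
          by_cases heq : pvGetI a pvIdK = pvGetI r pvIdK <;>
            split <;> simp_all
      rw [hpt]
      simp

lemma a_eq_gs (xs : List PRel) : filter_relations_py xs = gs xs := by
  unfold filter_relations_py
  rw [sorted2_eq, a_fold]
  have : (fun r : PRel => !(PySem.Set.contains PySem.Set.empty (rid r))) = fun _ => true := by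
    funext r; rfl
  rw [this, List.filter_true, List.nil_append, dd_sorted_eq_gs]

-- ===== B side =====

def bstep (d : PySem.Dict Int PRel) (r : PRel) : PySem.Dict Int PRel :=
  match d.get? (rid r) with
  | none => d.insert (rid r) r
  | some current => if rflag r > rflag current then d.insert (rid r) r else d

def BInv (d : PySem.Dict Int PRel) (ds : List PRel) : Prop :=
  d.items.Perm (ds.map pr) ∧ ds.Pairwise (fun a b => rid b < rid a)

lemma find_unique (l : List (Int × PRel)) (i : Int) (v : PRel)
    (hn : (l.map Prod.fst).Nodup) (hm : (i, v) ∈ l) :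
    l.find? (fun p => p.1 == i) = some (i, v) := by
  induction l with
  | nil => simp at hm
  | cons q l ih =>
    rcases List.mem_cons.mp hm with rfl | hm'
    · simp
    · have hq : q.1 ≠ i := by
        rcases List.nodup_cons.mp hn with ⟨hq1, _⟩
        intro h
        exact hq1 (by rw [h]; exact List.mem_map.mpr ⟨(i, v), hm', rfl⟩)
      rw [List.find?_cons_of_neg (by simpa using hq)]
      exact ih (List.nodup_cons.mp hn).2 hm'

lemma mem_dIns (x s : PRel) (ds : List PRel) (h : s ∈ dIns x ds) : s = x ∨ s ∈ ds := by
  induction ds with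
  | nil => simp [dIns] at h; tauto
  | cons d ds ih =>
    simp only [dIns] at h
    split at h
    · rcases List.mem_cons.mp h with rfl | h' <;> tauto
    · split at h
      · split at h <;> rcases List.mem_cons.mp h with rfl | h' <;> simp_all
      · rcases List.mem_cons.mp h with rfl | h'
        · simp
        · rcases ih h' with rfl | h'' <;> simp_all

lemma dIns_pairwise (x : PRel) (ds : List PRel) (h : ds.Pairwise (fun a b => rid b < rid a)) :
    (dIns x ds).Pairwise (fun a b => rid b < rid a) := by
  induction ds with
  | nil => simp [dIns]
  | cons d ds ih =>
    rcases List.pairwise_cons.mp h with ⟨hd, hds⟩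
    simp only [dIns]
    split
    · refine List.pairwise_cons.mpr ⟨?_, h⟩
      intro s hs
      rcases List.mem_cons.mp hs with rfl | hs' <;> [omega; exact lt_trans (hd s hs') (by omega)]
    · split
      · split
        · refine List.pairwise_cons.mpr ⟨?_, hds⟩
          intro s hs
          have := hd s hs; omega
        · exact h
      · refine List.pairwise_cons.mpr ⟨?_, ih hds⟩
        intro s hs
        rcases mem_dIns x s ds hs with rfl | hs'
        · omega
        · exact hd s hs'

lemma dIns_perm_fresh (x : PRel) (ds : List PRel) (h : rid x ∉ ds.map rid) :
    (dIns x ds).Perm (x :: ds) := by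
  induction ds with
  | nil => simp [dIns]
  | cons d ds ih =>
    have hne : rid x ≠ rid d := by simp at h; tauto
    have hnm : rid x ∉ ds.map rid := by simp at h ⊢; tauto
    simp only [dIns]
    split
    · exact List.Perm.refl _
    · exact ((ih hnm).cons d).trans (List.Perm.swap x d ds)

lemma dIns_replace (x : PRel) (ds : List PRel) (h : ds.Pairwise (fun a b => rid b < rid a))
    (d0 : PRel) (hm : d0 ∈ ds) (hid : rid d0 = rid x) (hf : rflag d0 < rflag x) :
    (ds.map pr).map (fun p => if p.1 == rid x then (rid x, x) else p) = (dIns x ds).map pr := by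
  induction ds with
  | nil => simp at hm
  | cons d ds ih =>
    rcases List.pairwise_cons.mp h with ⟨hd, hds⟩
    rcases List.mem_cons.mp hm with rfl | hm'
    · simp only [dIns]
      rw [if_neg (by omega), if_pos (by omega), if_pos hf]
      simp only [List.map_cons, List.map_map]
      rw [if_pos (by simp [pr, hid])]
      congr 1
      have : ∀ s ∈ ds, ((fun p : Int × PRel => if p.1 == rid x then (rid x, x) else p) ∘ pr) s = pr s := by
        intro s hs
        have := hd s hs
        simp [pr]; omega
      rw [List.map_congr_left this]
    · have hlt : rid d0 < rid d := hd d0 hm'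
      simp only [dIns]
      rw [if_neg (by omega), if_neg (by omega)]
      simp only [List.map_cons, List.map_map]
      rw [if_neg (by simp [pr]; omega)]
      congr 1
      simpa [List.map_map] using ih hds hm'

lemma dIns_keep (x : PRel) (ds : List PRel) (h : ds.Pairwise (fun a b => rid b < rid a))
    (d0 : PRel) (hm : d0 ∈ ds) (hid : rid d0 = rid x) (hf : ¬ rflag d0 < rflag x) :
    dIns x ds = ds := by
  induction ds with
  | nil => simp at hm
  | cons d ds ih =>
    rcases List.pairwise_cons.mp h with ⟨hd, hds⟩
    rcases List.mem_cons.mp hm with rfl | hm'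
    · simp only [dIns]
      rw [if_neg (by omega), if_pos (by omega), if_neg hf]
    · have hlt : rid d0 < rid d := hd d0 hm'
      simp only [dIns]
      rw [if_neg (by omega), if_neg (by omega), ih hds hm']

lemma inv_step (d : PySem.Dict Int PRel) (ds : List PRel) (r : PRel) (h : BInv d ds) :
    BInv (bstep d r) (dIns r ds) := by
  obtain ⟨hperm, hpw⟩ := h
  have hnodup_ds : (ds.map rid).Nodup :=
    (List.pairwise_map.mpr hpw).imp (fun hlt => ne_of_gt hlt)
  have hkeys : (d.items.map Prod.fst).Perm (ds.map rid) := by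
    have := hperm.map Prod.fst
    simpa [pr, List.map_map, Function.comp_def] using this
  have hnodup : (d.items.map Prod.fst).Nodup := hkeys.nodup_iff.mpr hnodup_ds
  unfold bstep
  by_cases hin : rid r ∈ ds.map rid
  · obtain ⟨d0, hd0m, hd0i⟩ := List.mem_map.mp hin
    have hmem : (rid r, d0) ∈ d.items := hperm.mem_iff.mpr (by
      have : pr d0 ∈ ds.map pr := List.mem_map_of_mem hd0m
      simpa [pr, hd0i] using this)
    have hget : d.get? (rid r) = some d0 := by
      simp [PySem.Dict.get?, find_unique d.items (rid r) d0 hnodup hmem]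
    rw [hget]
    dsimp only
    by_cases hf : rflag r > rflag d0
    · rw [if_pos hf]
      have hcont : d.contains (rid r) = true := by
        simp only [PySem.Dict.contains, List.any_eq_true]
        exact ⟨(rid r, d0), hmem, by simp⟩
      refine ⟨?_, dIns_pairwise r ds hpw⟩
      have hitems : (d.insert (rid r) r).items =
          d.items.map (fun p => if p.1 == rid r then (rid r, r) else p) := by
        simp [PySem.Dict.insert, hcont]
      rw [hitems, ← dIns_replace r ds hpw d0 hd0m hd0i (by omega)]
      exact hperm.map _
    · rw [if_neg hf]
      rw [dIns_keep r ds hpw d0 hd0m hd0i (by omega)]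
      exact ⟨hperm, hpw⟩
  · have hnone : ∀ p ∈ d.items, ¬(p.1 == rid r) = true := by
      intro p hp
      have hp' : p ∈ ds.map pr := hperm.mem_iff.mp hp
      obtain ⟨s, hs, rfl⟩ := List.mem_map.mp hp'
      have : rid s ≠ rid r := fun hc => hin (hc ▸ List.mem_map_of_mem hs)
      simpa [pr] using this
    have hget : d.get? (rid r) = none := by
      simp [PySem.Dict.get?, List.find?_eq_none.mpr hnone]
    rw [hget]
    dsimp only
    have hcont : d.contains (rid r) = false := by
      simp only [PySem.Dict.contains]
      rw [List.any_eq_false]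
      exact hnone
    refine ⟨?_, dIns_pairwise r ds hpw⟩
    have hitems : (d.insert (rid r) r).items = d.items ++ [(rid r, r)] := by
      simp [PySem.Dict.insert, hcont]
    rw [hitems]
    refine (List.perm_append_singleton _ _).trans ((hperm.cons _).trans ?_)
    have := (dIns_perm_fresh r ds hin).map pr
    simpa [pr] using this.symm

lemma inv_fold (xs : List PRel) : BInv (xs.foldl bstep PySem.Dict.empty) (gs xs) := by
  induction xs using List.reverseRecOn with
  | nil => exact ⟨by simp [PySem.Dict.empty, gs], by simp [gs]⟩
  | append_singleton xs x ih =>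
    rw [List.foldl_append, List.foldl_cons, List.foldl_nil]
    unfold gs
    rw [List.foldl_append, List.foldl_cons, List.foldl_nil]
    exact inv_step _ _ x ih

lemma b_eq_gs (xs : List PRel) : filter_relations_py_alt xs = gs xs := by
  unfold filter_relations_py_alt
  show (PySem.List.sorted (xs.foldl bstep PySem.Dict.empty).keys (fun k => k) true).map
      (fun i => (xs.foldl bstep PySem.Dict.empty).getD i []) = gs xs
  obtain ⟨hperm, hpw⟩ := inv_fold xs
  have hpwk : ((gs xs).map rid).Pairwise (fun a b => b < a) := List.pairwise_map.mpr hpw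
  have hkeys : ((gs xs).map rid).Perm (xs.foldl bstep PySem.Dict.empty).keys := by
    have := (hperm.map Prod.fst).symm
    simpa [PySem.Dict.keys, pr, List.map_map, Function.comp_def] using this
  have hnodup : ((xs.foldl bstep PySem.Dict.empty).items.map Prod.fst).Nodup := by
    have h1 : ((gs xs).map rid).Nodup := hpwk.imp (fun hlt => ne_of_gt hlt)
    have h2 := hkeys.nodup_iff.mp h1
    simpa [PySem.Dict.keys] using h2
  rw [PySem.List.sorted_rev_eq_of_perm_of_pairwise_gt _ _ _ hkeys hpwk, List.map_map]
  have hval : ∀ s ∈ gs xs, ((fun i => (xs.foldl bstep PySem.Dict.empty).getD i []) ∘ rid) s = id s := by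
    intro s hs
    have hmem : (rid s, s) ∈ (xs.foldl bstep PySem.Dict.empty).items :=
      hperm.mem_iff.mpr (by simpa [pr] using List.mem_map_of_mem (f := pr) hs)
    simp [PySem.Dict.getD, PySem.Dict.get?,
      find_unique _ (rid s) s hnodup hmem]
  rw [List.map_congr_left hval, List.map_id]

-- ===== VERDICT (by name: the statement is the Claim_ definition above) =====
theorem filter_relations_py_spec : Claim_equal_filter_relations_py := by
  intro relations _ _
  unfold Spec_filter_relations_py
  rw [a_eq_gs, b_eq_gs]
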